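-- pv_equiv track=rewrite | github.com/DanyalAbbas/vjudge-practice | Contest 6/e.py | foo
-- ===== SOURCE A (Python) =====
-- def foo(s, q):
--     answers = []
--     if len(s) < 4:
--         answers = ["NO" for i in q]
--         return answers
--
--     for i in q:
--         temp = s
--         temp[int(i[0])] = i[1]
--         if "1100" in temp:
--             answers.append("YES")
--         else:
--             answers.append("NO")
--
--     return answers
-- ===== SOURCE B (Python) =====
-- def foo(s, q):
--     if len(s) < 4:
--         return ["NO" for _ in q]
--     cnt = s.count("1100")
--     counts = []
--     for i in q:
--         idx = int(i[0])
--         cnt += (i[1] == "1100") - (s[idx] == "1100")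
--         s[idx] = i[1]
--         counts.append(cnt)
--     return ["YES" if c > 0 else "NO" for c in counts]
-- ===== Notes on version B (the rewrite author's own statement) =====
-- stated objective: faster
-- what changed: B counts "1100"-elements once up front and, in a first pass, maintains that count incrementally across the same in-place updates, recording the running count per query; a second pass maps the counts to YES/NO, instead of A's full-list membership rescan after every query.
import Mathlib
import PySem

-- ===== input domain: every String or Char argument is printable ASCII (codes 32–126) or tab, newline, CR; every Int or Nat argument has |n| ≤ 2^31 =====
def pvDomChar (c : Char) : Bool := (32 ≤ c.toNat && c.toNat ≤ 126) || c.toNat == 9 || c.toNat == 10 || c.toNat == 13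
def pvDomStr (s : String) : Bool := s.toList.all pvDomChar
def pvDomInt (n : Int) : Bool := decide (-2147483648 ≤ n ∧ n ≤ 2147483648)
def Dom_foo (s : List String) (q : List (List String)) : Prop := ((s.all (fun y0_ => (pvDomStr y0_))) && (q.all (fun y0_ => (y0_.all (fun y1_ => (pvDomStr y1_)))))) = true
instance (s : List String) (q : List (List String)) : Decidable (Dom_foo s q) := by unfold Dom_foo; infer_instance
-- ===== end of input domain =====

-- B counts the "1100" elements once, then a first pass performs the same in-place updates while
-- recording a running count per query, and a second pass maps counts to YES/NO, replacing A's
-- per-query full-list membership rescan (faster); equivalence is about the return value, both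
-- Pythons mutate s identically.

-- ===== PORT A =====
-- 'for i in q: temp = s; temp[int(i[0])] = i[1]; if "1100" in temp: …' — temp aliases s,
-- so the updated list is carried to the next iteration.
def fooLoopA (s : List String) (qs : List (List String)) (acc : List String) : List String :=
  match qs with
  | [] => acc
  | i :: rest =>
      let temp := PySem.List.pySetD s ((PySem.Int.ofStr? (PySem.List.pyGetD i 0 "")).getD 0)
                    (PySem.List.pyGetD i 1 "")
      fooLoopA temp rest (acc ++ [if "1100" ∈ temp then "YES" else "NO"])

def foo (s : List String) (q : List (List String)) : List String :=
  if s.length < 4 then q.map (fun _ => "NO") else fooLoopA s q []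

-- ===== PORT B =====
-- first pass: running counts of "1100"-elements, one per query (list built head-first)
def fooCounts (s : List String) (cnt : Int) (qs : List (List String)) : List Int :=
  match qs with
  | [] => []
  | i :: rest =>
      let idx := (PySem.Int.ofStr? (PySem.List.pyGetD i 0 "")).getD 0
      let nw := PySem.List.pyGetD i 1 ""
      let cnt' := cnt + ((if nw = "1100" then (1:Int) else 0)
                          - (if PySem.List.pyGetD s idx "" = "1100" then 1 else 0))
      cnt' :: fooCounts (PySem.List.pySetD s idx nw) cnt' rest

def foo_alt (s : List String) (q : List (List String)) : List String :=
  if s.length < 4 then q.map (fun _ => "NO")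
  else (fooCounts s (s.count "1100") q).map (fun c => if 0 < c then "YES" else "NO")

-- ===== PRECONDITION & SPEC =====
-- a query is well-formed: it has both components, int(i[0]) parses, and the index is in range
def wfQ (len : Nat) (i : List String) : Bool :=
  decide (2 ≤ i.length) &&
    (match PySem.Int.ofStr? (PySem.List.pyGetD i 0 "") with
     | some n => decide (PySem.Raise.InRange len n)
     | none => false)

-- Pre_ excludes exactly the inputs on which A raises: len(s) ≥ 4 and some query is missing a
-- component (IndexError), has an unparsable index (ValueError), or an out-of-range index (IndexError).
def Pre_foo (s : List String) (q : List (List String)) : Prop :=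
  s.length < 4 ∨ ∀ i ∈ q, wfQ s.length i = true
instance (s : List String) (q : List (List String)) : Decidable (Pre_foo s q) := by
  unfold Pre_foo; infer_instance

def pvWitness_foo : List String × List (List String) :=
  (["1", "1", "0", "0"], [["0", "1100"], ["-1", "0"]])

def Spec_foo (s : List String) (q : List (List String)) (out : List String) : Prop := out = foo_alt s q
instance (s : List String) (q : List (List String)) (out : List String) : Decidable (Spec_foo s q out) := by unfold Spec_foo; infer_instance

-- ===== CLAIM (what is proved, stated in full; the proofs are below) =====
def Claim_equal_foo : Prop := ∀ (s : List String) (q : List (List String)), Dom_foo s q → Pre_foo s q → Spec_foo s q (foo s q)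

-- ===== LEMMAS AND PROOFS =====

-- normalizing an in-range (possibly negative) Python index for set/get
theorem pySetGet_norm (xs : List String) (i : Int) (v : String)
    (h : PySem.Raise.InRange xs.length i) :
    ∃ n : Nat, n < xs.length ∧ PySem.List.pySetD xs i v = xs.set n v ∧
      PySem.List.pyGetD xs i "" = xs.getD n "" := by
  unfold PySem.Raise.InRange at h
  by_cases h0 : 0 ≤ i
  · refine ⟨i.toNat, by omega, ?_, ?_⟩
    · simp [PySem.List.pySetD, PySem.List.pySet?, PySem.List.pyIdx?, h0, h.2]
    · simp [PySem.List.pyGetD, PySem.List.pyGet?, PySem.List.pyIdx?, h0, h.2,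
        List.getD_eq_getElem?_getD]
  · refine ⟨xs.length - (-i).toNat, by omega, ?_, ?_⟩
    · simp [PySem.List.pySetD, PySem.List.pySet?, PySem.List.pyIdx?, h0, h.1]
    · simp [PySem.List.pyGetD, PySem.List.pyGet?, PySem.List.pyIdx?, h0, h.1,
        List.getD_eq_getElem?_getD]

-- how one update changes the number of "1100" elements
theorem count_set_int (xs : List String) (n : Nat) (h : n < xs.length) (v w : String) :
    ((xs.set n v).count w : Int) =
      (xs.count w : Int) + ((if v = w then 1 else 0) - (if xs.getD n "" = w then 1 else 0)) := by
  induction xs generalizing n with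
  | nil => simp at h
  | cons x xs ih =>
    cases n with
    | zero =>
      simp only [List.set_cons_zero, List.count_cons, List.getD_cons_zero]
      split_ifs <;> simp_all
    | succ m =>
      have := ih m (by simpa using h)
      simp [List.count_cons, this]
      by_cases hx : x = w <;> simp [hx] <;> omega

-- loop correspondence: A's accumulator loop equals YES/NO-mapping B's running counts,
-- the invariant being that cnt equals the number of "1100" elements of the current list
theorem loops_eq (qs : List (List String)) (s : List String) (acc : List String)
    (hwf : ∀ i ∈ qs, wfQ s.length i = true) :
    fooLoopA s qs acc =
      acc ++ (fooCounts s (s.count "1100") qs).map (fun c => if 0 < c then "YES" else "NO") := by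
  induction qs generalizing s acc with
  | nil => simp [fooLoopA, fooCounts]
  | cons i rest ih =>
    have hw := hwf i (by simp)
    unfold wfQ at hw
    rcases hm : PySem.Int.ofStr? (PySem.List.pyGetD i 0 "") with _ | k
    · rw [hm] at hw; simp at hw
    · rw [hm] at hw
      simp only [Bool.and_eq_true, decide_eq_true_eq] at hw
      obtain ⟨n, hn, hset, hget⟩ := pySetGet_norm s k (PySem.List.pyGetD i 1 "") hw.2
      unfold fooLoopA fooCounts
      simp only [hm, Option.getD_some]
      rw [hset, hget]
      have hcnt : ((s.count "1100" : Int))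
            + ((if PySem.List.pyGetD i 1 "" = "1100" then (1:Int) else 0)
               - (if s.getD n "" = "1100" then 1 else 0))
          = ((s.set n (PySem.List.pyGetD i 1 "")).count "1100" : Int) :=
        (count_set_int s n hn _ _).symm
      rw [hcnt]
      have hcond : (if "1100" ∈ s.set n (PySem.List.pyGetD i 1 "") then "YES" else "NO")
          = (if (0:Int) < ((s.set n (PySem.List.pyGetD i 1 "")).count "1100" : Int) then "YES" else "NO") := by
        by_cases hmem : "1100" ∈ s.set n (PySem.List.pyGetD i 1 "") <;>
          simp [hmem, List.count_pos_iff]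
      rw [List.map_cons, hcond]
      rw [ih _ (acc ++ [_]) (fun j hj => by
        have := hwf j (by simp [hj])
        simpa [List.length_set] using this)]
      simp

-- ===== VERDICT (by name: the statement is the Claim_ definition above) =====
theorem foo_spec : Claim_equal_foo := by
  intro s q _ hpre
  unfold Spec_foo foo foo_alt
  split
  · rfl
  · rcases hpre with h | h
    · omega
    · simpa using loops_eq q s [] h
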